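-- pv_equiv track=rewrite | github.com/constkolesnyak/polyglotka | scripts/excel_to_srt.py | _compute_next_starts
-- ===== SOURCE A (Python) =====
-- from typing import Optional, Sequence
--
-- def _compute_next_starts(times_ms: Sequence[Optional[int]]) -> list[Optional[int]]:
--     next_starts: list[Optional[int]] = [None] * len(times_ms)
--     next_start: Optional[int] = None
--     for idx in range(len(times_ms) - 1, -1, -1):
--         next_starts[idx] = next_start
--         current = times_ms[idx]
--         if current is not None:
--             next_start = current
--     return next_starts
-- ===== SOURCE B (Python) =====
-- from typing import Optional, Sequence
--
-- def _compute_next_starts(times_ms: Sequence[Optional[int]]) -> list[Optional[int]]: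
--     # Forward single pass: count indices whose "next start" is still unknown
--     # (they are always a contiguous block ending at the current position);
--     # when a non-None time appears, it resolves all of them at once.
--     out: list[Optional[int]] = []
--     pending = 0
--     for t in times_ms:
--         if t is None:
--             pending += 1
--         else:
--             out.extend([t] * pending)
--             pending = 1
--     out.extend([None] * pending)
--     return out
-- ===== Notes on version B (the rewrite author's own statement) =====
-- stated objective: alternative
-- what changed: Replaces A's backward index loop carrying the next seen value with a forward pass that counts the contiguous block of still-unresolved positions and flushes them all when a non-None time appears.
import Mathlib
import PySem

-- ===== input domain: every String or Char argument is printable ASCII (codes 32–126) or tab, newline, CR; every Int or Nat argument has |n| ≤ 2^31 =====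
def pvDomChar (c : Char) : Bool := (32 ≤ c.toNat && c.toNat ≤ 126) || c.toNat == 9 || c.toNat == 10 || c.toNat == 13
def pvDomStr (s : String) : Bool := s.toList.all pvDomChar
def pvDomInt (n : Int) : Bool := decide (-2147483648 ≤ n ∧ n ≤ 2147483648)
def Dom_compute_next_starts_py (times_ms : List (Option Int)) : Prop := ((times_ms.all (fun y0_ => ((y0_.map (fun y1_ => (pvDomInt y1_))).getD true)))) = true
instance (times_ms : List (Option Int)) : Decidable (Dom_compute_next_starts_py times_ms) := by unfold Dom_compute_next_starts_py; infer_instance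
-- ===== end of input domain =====

-- B replaces A's backward carried-value loop with a forward pass that counts the
-- pending (still-unresolved) contiguous positions and flushes them on each non-None
-- time (objective: alternative decomposition, same cost).


-- ===== PORT A =====
-- A's loop runs idx from len-1 down to 0, first writing the carried next_start at idx,
-- then updating the carry from times_ms[idx]; this is the structural recursion from the
-- right over the same state (outputs built so far, carried next_start).
def pvGoA : List (Option Int) → (List (Option Int) × Option Int)
  | [] => ([], none)
  | x :: xs =>
      let r := pvGoA xs
      (r.2 :: r.1, match x with | some v => some v | none => r.2)

def compute_next_starts_py (times_ms : List (Option Int)) : List (Option Int) :=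
  (pvGoA times_ms).1

-- ===== PORT B =====
-- forward fold: state = (output so far, count of pending unresolved positions)
def compute_next_starts_py_alt (times_ms : List (Option Int)) : List (Option Int) :=
  let st := times_ms.foldl
    (fun (st : List (Option Int) × Nat) t =>
      match t with
      | none => (st.1, st.2 + 1)
      | some v => (st.1 ++ List.replicate st.2 (some v), 1))
    ([], 0)
  st.1 ++ List.replicate st.2 none

-- ===== PRECONDITION & SPEC =====
def Spec_compute_next_starts_py (times_ms : List (Option Int)) (out : List (Option Int)) : Prop := out = compute_next_starts_py_alt times_ms
instance (times_ms : List (Option Int)) (out : List (Option Int)) : Decidable (Spec_compute_next_starts_py times_ms out) := by unfold Spec_compute_next_starts_py; infer_instance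

-- ===== CLAIM (what is proved, stated in full; the proofs are below) =====
def Claim_equal_compute_next_starts_py : Prop := ∀ (times_ms : List (Option Int)), Dom_compute_next_starts_py times_ms → Spec_compute_next_starts_py times_ms (compute_next_starts_py times_ms)

-- ===== LEMMAS AND PROOFS =====

-- Invariant of B's fold: starting from (out, p), the fold-then-flush result is
-- out, then p copies of the first non-None of xs (A's carried value), then A's outputs for xs.
theorem pvFoldB_inv (xs : List (Option Int)) (out : List (Option Int)) (p : Nat) :
    (let st := xs.foldl
        (fun (st : List (Option Int) × Nat) t =>
          match t with
          | none => (st.1, st.2 + 1)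
          | some v => (st.1 ++ List.replicate st.2 (some v), 1))
        (out, p)
     st.1 ++ List.replicate st.2 none)
    = out ++ List.replicate p ((pvGoA xs).2) ++ (pvGoA xs).1 := by
  induction xs generalizing out p with
  | nil => simp [pvGoA]
  | cons x xs ih =>
      cases x with
      | none =>
          simp only [List.foldl_cons]
          rw [ih]
          simp [pvGoA, List.replicate_succ']
      | some v =>
          simp only [List.foldl_cons]
          rw [ih]
          simp [pvGoA]

-- ===== VERDICT (by name: the statement is the Claim_ definition above) =====
theorem compute_next_starts_py_spec : Claim_equal_compute_next_starts_py := by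
  intro xs _
  show compute_next_starts_py xs = compute_next_starts_py_alt xs
  unfold compute_next_starts_py compute_next_starts_py_alt
  have h := pvFoldB_inv xs [] 0
  simpa using h.symm
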